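-- pv_equiv track=rewrite | github.com/Starboyxd007/DSA-PY | DSA AND DSA PROBS SOL/DSA AND DSA PROBS SOL/checkArrayForDoubles.py | checkArrayForDoubles
-- ===== SOURCE A (Python) =====
-- def checkArrayForDoubles(nums):
--     numSet = set()
--     for num in nums:
--         if num in numSet:
--             return False
--         else:
--             numSet.add(num)
--     return True
-- ===== SOURCE B (Python) =====
-- def checkArrayForDoubles(nums):
--     return len(set(nums)) == len(nums)
-- ===== Notes on version B (the rewrite author's own statement) =====
-- stated objective: idiomatic
-- what changed: Replaced the element-by-element loop with a membership branch and early return by a single cardinality comparison len(set(nums)) == len(nums).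
import Mathlib
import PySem

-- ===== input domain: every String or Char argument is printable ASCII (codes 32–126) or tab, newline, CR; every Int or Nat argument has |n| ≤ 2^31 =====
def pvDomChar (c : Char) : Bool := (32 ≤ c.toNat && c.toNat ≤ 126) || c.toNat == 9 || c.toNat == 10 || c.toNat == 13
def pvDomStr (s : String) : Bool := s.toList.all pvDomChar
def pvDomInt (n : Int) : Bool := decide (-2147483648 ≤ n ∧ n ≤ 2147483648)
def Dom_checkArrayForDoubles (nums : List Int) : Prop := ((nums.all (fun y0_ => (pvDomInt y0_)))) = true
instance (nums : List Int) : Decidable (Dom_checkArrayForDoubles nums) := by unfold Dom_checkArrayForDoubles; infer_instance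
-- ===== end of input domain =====

-- B replaces A's loop (membership test + early return) by the single cardinality
-- comparison len(set(nums)) == len(nums); objective: idiomatic, same cost.

-- ===== PORT A =====
-- the 'for num in nums' loop with early 'return False', carrying the growing set
def checkArrayForDoublesLoop (numSet : PySem.Set Int) : List Int → Bool
  | [] => true
  | num :: rest =>
      if PySem.Set.contains numSet num then false
      else checkArrayForDoublesLoop (PySem.Set.add numSet num) rest

def checkArrayForDoubles (nums : List Int) : Bool :=
  checkArrayForDoublesLoop PySem.Set.empty nums

-- ===== PORT B =====
def checkArrayForDoubles_alt (nums : List Int) : Bool :=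
  decide (PySem.Set.len (PySem.Set.ofList nums) = nums.length)

-- ===== PRECONDITION & SPEC =====
def Spec_checkArrayForDoubles (nums : List Int) (out : Bool) : Prop := out = checkArrayForDoubles_alt nums
instance (nums : List Int) (out : Bool) : Decidable (Spec_checkArrayForDoubles nums out) := by unfold Spec_checkArrayForDoubles; infer_instance

-- ===== CLAIM (what is proved, stated in full; the proofs are below) =====
def Claim_equal_checkArrayForDoubles : Prop := ∀ (nums : List Int), Dom_checkArrayForDoubles nums → Spec_checkArrayForDoubles nums (checkArrayForDoubles nums)

-- ===== LEMMAS AND PROOFS =====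

-- A's loop returns true exactly when the remaining list is duplicate-free and disjoint from the set so far
theorem loopA_eq_decide (l : List Int) : ∀ (s : PySem.Set Int),
    checkArrayForDoublesLoop s l = decide (l.Nodup ∧ ∀ x ∈ l, x ∉ s) := by
  induction l with
  | nil => intro s; simp [checkArrayForDoublesLoop]
  | cons a l ih =>
      intro s
      simp only [checkArrayForDoublesLoop]
      by_cases h : a ∈ s
      · have : PySem.Set.contains s a = true := by
          simpa [PySem.Set.contains_iff] using h
        simp [this, h]
      · have hc : PySem.Set.contains s a = false := by
          simp [PySem.Set.contains_iff, h]
        rw [hc]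
        simp only [Bool.false_eq_true, if_false]
        rw [ih]
        apply decide_eq_decide.mpr
        simp only [List.nodup_cons, List.mem_cons, PySem.Set.mem_add, forall_eq_or_imp,
          not_or]
        constructor
        · rintro ⟨hn, hd⟩
          exact ⟨⟨fun hm => (hd a hm).2 rfl, hn⟩, h, fun x hx => (hd x hx).1⟩
        · rintro ⟨⟨hal, hn⟩, _, hd⟩
          exact ⟨hn, fun x hx => ⟨hd x hx, fun he => hal (he ▸ hx)⟩⟩
      termination_by l.length

-- set(l), built by folding add, is a sublist of l
theorem foldl_add_sublist (l : List Int) : ∀ (s : PySem.Set Int),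
    ∃ t, l.foldl PySem.Set.add s = s ++ t ∧ t.Sublist l := by
  induction l with
  | nil => intro s; exact ⟨[], by simp⟩
  | cons a l ih =>
      intro s
      by_cases h : a ∈ s
      · obtain ⟨t, ht, hs⟩ := ih s
        refine ⟨t, ?_, hs.cons a⟩
        simpa [List.foldl_cons, PySem.Set.add, PySem.Set.contains_iff, h] using ht
      · obtain ⟨t, ht, hs⟩ := ih (s ++ [a])
        refine ⟨a :: t, ?_, hs.cons₂ a⟩
        simpa [List.foldl_cons, PySem.Set.add, PySem.Set.contains_iff, h] using ht

theorem ofList_length_eq_iff (l : List Int) :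
    (PySem.Set.ofList l).length = l.length ↔ l.Nodup := by
  constructor
  · intro h
    obtain ⟨t, ht, hs⟩ := foldl_add_sublist l PySem.Set.empty
    have hol : PySem.Set.ofList l = t := by
      simpa [PySem.Set.ofList_eq_foldl, PySem.Set.empty] using ht
    have hlen : t.length = l.length := by rw [← hol]; exact h
    have : t = l := hs.eq_of_length hlen
    have hnd : (PySem.Set.ofList l).Nodup := PySem.Set.nodup_ofList l
    rwa [hol, this] at hnd
  · intro h
    rw [PySem.Set.ofList_eq_self_of_nodup l h]

-- ===== VERDICT (by name: the statement is the Claim_ definition above) =====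
theorem checkArrayForDoubles_spec : Claim_equal_checkArrayForDoubles := by
  intro nums _
  unfold Spec_checkArrayForDoubles checkArrayForDoubles checkArrayForDoubles_alt
  rw [loopA_eq_decide]
  apply decide_eq_decide.mpr
  simp [PySem.Set.empty, PySem.Set.len, ofList_length_eq_iff]
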